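-- pv_equiv track=rewrite | github.com/Yashashree-Joshi/Recipe-Recommendation | keyword_processor.py | looks_like_gibberish
-- ===== SOURCE A (Python) =====
-- def looks_like_gibberish(word: str) -> bool:
--     vowels = set("aeiou")
--
--     # Rule 1: no vowels
--     if not any(char in vowels for char in word):
--         return True
--
--     # Rule 2: too many consonants in a row
--     consonant_streak = 0
--     for char in word:
--         if char not in vowels:
--             consonant_streak += 1
--             if consonant_streak >= 4:
--                 return True
--         else:
--             consonant_streak = 0
--
--     # Rule 3: suspiciously long single word
--     if len(word) > 12:
--         return True
--
--     return False
-- ===== SOURCE B (Python) =====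
-- def looks_like_gibberish(word: str) -> bool:
--     vowels = "aeiou"
--     return (all(c not in vowels for c in word)
--             or any(all(c not in vowels for c in word[i:i+4])
--                    for i in range(len(word) - 3))
--             or len(word) > 12)
-- ===== Notes on version B (the rewrite author's own statement) =====
-- stated objective: idiomatic
-- what changed: Replaced A's early-return control flow and stateful consonant-streak counter loop by a single boolean disjunction whose streak rule is a stateless sliding-window scan (any 4 consecutive characters all non-vowel).
import Mathlib
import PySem

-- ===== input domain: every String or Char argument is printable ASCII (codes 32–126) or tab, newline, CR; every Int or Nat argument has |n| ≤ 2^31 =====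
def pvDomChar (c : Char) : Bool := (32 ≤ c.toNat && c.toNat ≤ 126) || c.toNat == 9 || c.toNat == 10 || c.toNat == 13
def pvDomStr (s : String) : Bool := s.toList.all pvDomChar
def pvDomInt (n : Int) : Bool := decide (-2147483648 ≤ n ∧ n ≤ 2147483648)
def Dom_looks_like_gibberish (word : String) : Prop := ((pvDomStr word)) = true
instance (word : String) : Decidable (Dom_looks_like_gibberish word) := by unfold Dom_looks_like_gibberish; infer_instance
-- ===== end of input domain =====

-- B replaces A's stateful consonant-streak counter loop by a stateless sliding-window
-- scan (any window of 4 consecutive characters all non-vowel), as one boolean disjunction.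

-- membership in the vowel set "aeiou" (shared character test of both ports)
def pvIsVow (c : Char) : Bool := "aeiou".toList.contains c

-- ===== PORT A =====
-- Rule 2's loop: consonant_streak counter with early return at 4
def pvStreakLoop : List Char → Nat → Bool
  | [], _ => false
  | c :: rest, k =>
    if !(pvIsVow c) then
      (if k + 1 ≥ 4 then true else pvStreakLoop rest (k + 1))
    else pvStreakLoop rest 0

def looks_like_gibberish (word : String) : Bool :=
  -- Rule 1: no vowels
  if !(word.toList.any (fun c => pvIsVow c)) then true
  -- Rule 2: too many consonants in a row
  else if pvStreakLoop word.toList 0 then true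
  -- Rule 3: suspiciously long single word
  else if word.toList.length > 12 then true
  else false

-- ===== PORT B =====
def looks_like_gibberish_alt (word : String) : Bool :=
  (word.toList.all (fun c => !(pvIsVow c)))
  || ((List.range (word.toList.length - 3)).any (fun i => ((word.toList.drop i).take 4).all (fun c => !(pvIsVow c))))
  || decide (word.toList.length > 12)

-- ===== PRECONDITION & SPEC =====
def Spec_looks_like_gibberish (word : String) (out : Bool) : Prop := out = looks_like_gibberish_alt word
instance (word : String) (out : Bool) : Decidable (Spec_looks_like_gibberish word out) := by unfold Spec_looks_like_gibberish; infer_instance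

-- ===== CLAIM (what is proved, stated in full; the proofs are below) =====
def Claim_equal_looks_like_gibberish : Prop := ∀ (word : String), Dom_looks_like_gibberish word → Spec_looks_like_gibberish word (looks_like_gibberish word)

-- ===== LEMMAS AND PROOFS =====

-- "the first j characters exist and are all non-vowels"
def pvHR : Nat → List Char → Bool
  | 0, _ => true
  | _ + 1, [] => false
  | j + 1, c :: rest => !(pvIsVow c) && pvHR j rest

-- "some suffix starts with 4 non-vowels"
def pvRun4 : List Char → Bool
  | [] => false
  | c :: rest => pvHR 4 (c :: rest) || pvRun4 rest

theorem pvHR_mono : ∀ (l : List Char) (j j' : Nat), j' ≤ j → pvHR j l = true → pvHR j' l = true := by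
  intro l
  induction l with
  | nil => intro j j' hle h; cases j' with
    | zero => rfl
    | succ n => cases j with
      | zero => omega
      | succ m => simp [pvHR] at h
  | cons c rest ih =>
    intro j j' hle h
    cases j' with
    | zero => rfl
    | succ n =>
      cases j with
      | zero => omega
      | succ m =>
        simp [pvHR] at h ⊢
        exact ⟨h.1, ih m n (by omega) h.2⟩

theorem pvHR4_run4 : ∀ (l : List Char), pvHR 4 l = true → pvRun4 l = true := by
  intro l h
  cases l with
  | nil => simp [pvHR] at h
  | cons c rest => simp [pvRun4, h]

-- A's streak loop in terms of pvHR / pvRun4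
theorem pvStreakLoop_eq : ∀ (l : List Char) (k : Nat), k ≤ 3 →
    pvStreakLoop l k = (pvHR (4 - k) l || pvRun4 l) := by
  intro l
  induction l with
  | nil =>
    intro k hk
    interval_cases k <;> simp [pvStreakLoop, pvHR, pvRun4]
  | cons c rest ih =>
    intro k hk
    by_cases hv : pvIsVow c = true
    · -- vowel: streak resets to 0
      have h1 : pvStreakLoop (c :: rest) k = pvStreakLoop rest 0 := by
        simp [pvStreakLoop, hv]
      have h2 := ih 0 (by omega)
      rw [h1, h2]
      have hhd : pvHR (4 - k) (c :: rest) = false := by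
        have : ∃ m, 4 - k = m + 1 := ⟨3 - k, by omega⟩
        obtain ⟨m, hm⟩ := this
        simp [hm, pvHR, hv]
      have hr4 : pvHR 4 (c :: rest) = false := by simp [pvHR, hv]
      rw [hhd]
      show (pvHR 4 rest || pvRun4 rest) = (false || pvRun4 (c :: rest))
      simp only [pvRun4, hr4, Bool.false_or]
      cases h : pvHR 4 rest
      · simp
      · simp [pvHR4_run4 rest h]
    · -- consonant
      have hv' : pvIsVow c = false := by simpa using hv
      by_cases hk3 : k = 3
      · subst hk3
        simp [pvStreakLoop, hv', pvHR, pvRun4]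
      · have hkle : k ≤ 2 := by omega
        have h1 : pvStreakLoop (c :: rest) k = pvStreakLoop rest (k + 1) := by
          simp [pvStreakLoop, hv']; omega
        have h2 := ih (k + 1) (by omega)
        rw [h1, h2]
        have hm : 4 - (k + 1) = 3 - k := by omega
        have hhd : pvHR (4 - k) (c :: rest) = pvHR (3 - k) rest := by
          have : ∃ m, 4 - k = m + 1 ∧ m = 3 - k := ⟨3 - k, by omega, rfl⟩
          obtain ⟨m, h4, h3⟩ := this
          simp [h4, h3, pvHR, hv']
        have hr4 : pvHR 4 (c :: rest) = pvHR 3 rest := by simp [pvHR, hv']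
        rw [hm, hhd]
        show (pvHR (3 - k) rest || pvRun4 rest) = (pvHR (3 - k) rest || pvRun4 (c :: rest))
        simp only [pvRun4, hr4]
        cases h : pvHR 3 rest
        · simp
        · have := pvHR_mono rest 3 (3 - k) (by omega) h
          simp [this]

-- pvHR in terms of take/all
theorem pvHR_iff : ∀ (j : Nat) (l : List Char),
    pvHR j l = (decide (j ≤ l.length) && (l.take j).all (fun c => !(pvIsVow c))) := by
  intro j
  induction j with
  | zero => intro l; simp [pvHR]
  | succ n ih =>
    intro l
    cases l with
    | nil => simp [pvHR]
    | cons c rest =>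
      simp only [pvHR, ih rest, List.take_succ_cons, List.all_cons, List.length_cons]
      cases h : pvIsVow c <;> simp

theorem pvRun4_iff : ∀ (l : List Char), pvRun4 l = true ↔ ∃ i, pvHR 4 (l.drop i) = true := by
  intro l
  induction l with
  | nil =>
    simp [pvRun4, pvHR]
  | cons c rest ih =>
    simp only [pvRun4, Bool.or_eq_true, ih]
    constructor
    · rintro (h | ⟨i, hi⟩)
      · exact ⟨0, h⟩
      · exact ⟨i + 1, hi⟩
    · rintro ⟨i, hi⟩
      cases i with
      | zero => exact Or.inl hi
      | succ n => exact Or.inr ⟨n, hi⟩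

-- B's sliding-window scan equals pvRun4
theorem pvWindow_eq_run4 (l : List Char) :
    ((List.range (l.length - 3)).any (fun i => ((l.drop i).take 4).all (fun c => !(pvIsVow c))))
      = pvRun4 l := by
  cases hrun : pvRun4 l
  · -- pvRun4 false: no window can be all-consonant with full length
    rw [List.any_eq_false]
    intro i hi
    rw [List.mem_range] at hi
    intro hall
    have hlen : (4 : Nat) ≤ (l.drop i).length := by
      rw [List.length_drop]; omega
    have : pvHR 4 (l.drop i) = true := by
      rw [pvHR_iff]; simp only [hall, Bool.and_true]
      simpa using hlen
    have : pvRun4 l = true := (pvRun4_iff l).mpr ⟨i, this⟩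
    rw [hrun] at this; exact absurd this (by simp)
  · rw [List.any_eq_true]
    obtain ⟨i, hi⟩ := (pvRun4_iff l).mp hrun
    rw [pvHR_iff] at hi
    rw [Bool.and_eq_true] at hi
    obtain ⟨hd, h2⟩ := hi
    have h1 : (4 : Nat) ≤ (l.drop i).length := of_decide_eq_true hd
    rw [List.length_drop] at h1
    refine ⟨i, ?_, h2⟩
    rw [List.mem_range]
    omega

-- Rule 1: all-non-vowel is the negation of any-vowel
theorem pvAll_not_any (l : List Char) :
    l.all (fun c => !(pvIsVow c)) = !(l.any (fun c => pvIsVow c)) := by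
  induction l with
  | nil => rfl
  | cons c rest ih => simp [List.all_cons, List.any_cons, ih]

-- ===== VERDICT (by name: the statement is the Claim_ definition above) =====
theorem looks_like_gibberish_spec : Claim_equal_looks_like_gibberish := by
  intro word _
  unfold Spec_looks_like_gibberish looks_like_gibberish looks_like_gibberish_alt
  generalize word.toList = cs
  rw [pvWindow_eq_run4, pvAll_not_any, pvStreakLoop_eq cs 0 (by omega)]
  cases hv : cs.any (fun c => pvIsVow c)
  · simp
  · simp only [Bool.not_true, Bool.false_or]
    have : pvHR (4 - 0) cs = pvHR 4 cs := rfl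
    rw [this]
    cases hr : pvRun4 cs
    · cases h4 : pvHR 4 cs
      · by_cases h12 : cs.length > 12 <;> simp [h12]
      · have := pvHR4_run4 cs h4
        rw [hr] at this
        exact absurd this (by simp)
    · simp
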